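-- pv_equiv track=rewrite | github.com/jgrebol/hilbert | esi/esi.py | hamilton_mci_alg_4
-- ===== SOURCE A (Python) =====
-- def hamilton_mci_alg_4(n, d):
--     import math
--
--     def dfs(path):
--         if len(path) == n:
--             cycles.append(path)
--
--         for v in range(n):
--             if v not in path:
--                 val = min(abs(v - path[-1]), n - abs(v - path[-1]))
--
--                 if val <= d and val % 2 == 0:
--                     dfs(path + [v])
--
--     cycles = []
--     dfs([0])
--     return cycles
-- ===== SOURCE B (Python) =====
-- def hamilton_mci_alg_4(n, d):
--     # Level-synchronous (breadth-first) expansion: paths of length L, in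
--     # lexicographic-by-choice order, produce the same final list as A's DFS.
--     if n < 1:
--         return []
--     frontier = [[0]]
--     for _ in range(n - 1):
--         frontier = [p + [v]
--                     for p in frontier
--                     for v in range(n)
--                     if v not in p
--                     and min(abs(v - p[-1]), n - abs(v - p[-1])) <= d
--                     and min(abs(v - p[-1]), n - abs(v - p[-1])) % 2 == 0]
--     return frontier
-- ===== Notes on version B (the rewrite author's own statement) =====
-- stated objective: alternative
-- what changed: Replaces A's recursive depth-first search (appending completed paths via a closure) by an iterative level-synchronous breadth-first frontier expansion: start from [[0]] and apply n-1 rounds of 'extend every path by each admissible next vertex', which yields the same list in the same order since DFS emits only at depth n and visits children in ascending order.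
import Mathlib
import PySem

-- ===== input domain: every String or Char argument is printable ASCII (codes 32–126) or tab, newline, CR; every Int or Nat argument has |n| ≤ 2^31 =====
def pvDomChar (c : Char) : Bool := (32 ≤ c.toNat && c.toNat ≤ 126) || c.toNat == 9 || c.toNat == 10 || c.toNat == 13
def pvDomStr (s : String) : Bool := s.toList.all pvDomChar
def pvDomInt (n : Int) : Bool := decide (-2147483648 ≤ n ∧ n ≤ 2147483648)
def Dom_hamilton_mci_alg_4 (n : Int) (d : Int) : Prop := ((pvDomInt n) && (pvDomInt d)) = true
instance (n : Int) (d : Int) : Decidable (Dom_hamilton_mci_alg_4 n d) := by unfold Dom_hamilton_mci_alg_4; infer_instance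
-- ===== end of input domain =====

-- B replaces A's recursive depth-first search by a level-synchronous (breadth-first)
-- frontier expansion; same results in the same order (objective: alternative algorithm).

-- ===== PORT A =====
-- path[-1]; every path both programs build starts from [0] and is nonempty, so pyGet? is
-- always `some` and the `.getD 0` default is never used.
def pvLast (p : List Int) : Int := (PySem.List.pyGet? p (-1)).getD 0

-- A's inner `dfs`, made total with fuel (recursion depth is bounded by n, proved below;
-- the fuel is a totality guard, not an algorithm change).
def pvDfsA (n d : Int) : Nat → List Int → List (List Int) → List (List Int)
  | 0, _, cycles => cycles
  | fuel + 1, path, cycles =>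
    let cycles := if (path.length : Int) = n then cycles ++ [path] else cycles
    (PySem.List.pyRange 0 n 1).foldl
      (fun acc v =>
        if v ∈ path then acc
        else
          if min |v - pvLast path| (n - |v - pvLast path|) ≤ d ∧
             PySem.Int.mod (min |v - pvLast path| (n - |v - pvLast path|)) 2 = 0 then
            pvDfsA n d fuel (path ++ [v]) acc
          else acc)
      cycles

def hamilton_mci_alg_4 (n : Int) (d : Int) : List (List Int) :=
  pvDfsA n d (n.toNat + 1) [0] []

-- ===== PORT B =====
-- one round of B's list comprehension: all admissible one-step extensions of the frontier
def pvExpand (n d : Int) (frontier : List (List Int)) : List (List Int) :=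
  frontier.flatMap (fun p =>
    (PySem.List.pyRange 0 n 1).flatMap (fun v =>
      if v ∉ p ∧ min |v - pvLast p| (n - |v - pvLast p|) ≤ d ∧
         PySem.Int.mod (min |v - pvLast p| (n - |v - pvLast p|)) 2 = 0 then
        [p ++ [v]]
      else []))

def hamilton_mci_alg_4_alt (n : Int) (d : Int) : List (List Int) :=
  if n < 1 then []
  else (PySem.List.pyRange 0 (n - 1) 1).foldl (fun frontier _ => pvExpand n d frontier) [[0]]

-- ===== PRECONDITION & SPEC =====
def Spec_hamilton_mci_alg_4 (n : Int) (d : Int) (out : List (List Int)) : Prop := out = hamilton_mci_alg_4_alt n d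
instance (n : Int) (d : Int) (out : List (List Int)) : Decidable (Spec_hamilton_mci_alg_4 n d out) := by unfold Spec_hamilton_mci_alg_4; infer_instance

-- ===== CLAIM (what is proved, stated in full; the proofs are below) =====
def Claim_equal_hamilton_mci_alg_4 : Prop := ∀ (n : Int) (d : Int), Dom_hamilton_mci_alg_4 n d → Spec_hamilton_mci_alg_4 n d (hamilton_mci_alg_4 n d)

-- ===== LEMMAS AND PROOFS =====

-- k rounds of frontier expansion (the proof's common reference point)
def pvExpK (n d : Int) : Nat → List (List Int) → List (List Int)
  | 0, fr => fr
  | k + 1, fr => pvExpK n d k (pvExpand n d fr)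

theorem pvExpand_append (n d : Int) (xs ys : List (List Int)) :
    pvExpand n d (xs ++ ys) = pvExpand n d xs ++ pvExpand n d ys := by
  simp [pvExpand]

theorem pvExpK_nil (n d : Int) (k : Nat) : pvExpK n d k [] = [] := by
  induction k with
  | zero => rfl
  | succ k ih =>
    rw [pvExpK, show pvExpand n d [] = [] from by simp [pvExpand]]
    exact ih

theorem pvExpK_append (n d : Int) (k : Nat) (xs ys : List (List Int)) :
    pvExpK n d k (xs ++ ys) = pvExpK n d k xs ++ pvExpK n d k ys := by
  induction k generalizing xs ys with
  | zero => rfl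
  | succ k ih => rw [pvExpK, pvExpand_append, ih, pvExpK, pvExpK]

theorem pvExpK_flatMap (n d : Int) (k : Nat) (l : List Int) (g : Int → List (List Int)) :
    pvExpK n d k (l.flatMap g) = l.flatMap (fun v => pvExpK n d k (g v)) := by
  induction l with
  | nil => simp [pvExpK_nil]
  | cons a t ih => rw [List.flatMap_cons, pvExpK_append, ih, List.flatMap_cons]

theorem pv_foldl_const (n d : Int) (l : List Int) (fr : List (List Int)) :
    l.foldl (fun frontier _ => pvExpand n d frontier) fr = pvExpK n d l.length fr := by
  induction l generalizing fr with
  | nil => rfl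
  | cons a t ih => rw [List.foldl_cons, ih, List.length_cons]; rfl

theorem pv_foldl_skip {α β : Type} (l : List α) (f : β → α → β) (acc : β)
    (h : ∀ acc v, v ∈ l → f acc v = acc) : l.foldl f acc = acc := by
  induction l generalizing acc with
  | nil => rfl
  | cons a t ih =>
    rw [List.foldl_cons, h acc a (by simp)]
    exact ih acc (fun acc v hv => h acc v (by simp [hv]))

theorem pv_foldl_append_of {α β : Type} (l : List α) (f : List β → α → List β)
    (g : α → List β) (acc : List β)
    (h : ∀ acc v, v ∈ l → f acc v = acc ++ g v) :
    l.foldl f acc = acc ++ l.flatMap g := by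
  induction l generalizing acc with
  | nil => simp
  | cons a t ih =>
    rw [List.foldl_cons, h acc a (by simp),
        ih (acc ++ g a) (fun acc v hv => h acc v (by simp [hv]))]
    simp

-- On a full-length nodup path inside [0, n), every vertex of range(n) is already in the path.
theorem pv_full_path (n : Int) (path : List Int) (hnd : path.Nodup)
    (hsub : ∀ x ∈ path, x ∈ PySem.List.pyRange 0 n 1)
    (hlen : (path.length : Int) = n) :
    ∀ v ∈ PySem.List.pyRange 0 n 1, v ∈ path := by
  have hsp : List.Subperm path (PySem.List.pyRange 0 n 1) := hnd.subperm hsub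
  have hlenr : (PySem.List.pyRange 0 n 1).length ≤ path.length := by
    have := PySem.List.length_pyRange_one (a := 0) (b := n)
    omega
  have hperm := hsp.perm_of_length_le hlenr
  intro v hv
  exact hperm.mem_iff.mpr hv

-- Key invariant: with enough fuel, A's dfs from `path` appends exactly the k-round
-- frontier expansion of [path].
theorem pv_dfs_eq_expK (n d : Int) (k : Nat) :
    ∀ (fuel : Nat) (path : List Int) (acc : List (List Int)),
      k + 1 ≤ fuel → path.Nodup →
      (∀ x ∈ path, x ∈ PySem.List.pyRange 0 n 1) →
      (path.length : Int) + k = n →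
      pvDfsA n d fuel path acc = acc ++ pvExpK n d k [path] := by
  induction k with
  | zero =>
    intro fuel path acc hfuel hnd hsub hlen
    obtain ⟨f, rfl⟩ : ∃ f, fuel = f + 1 := ⟨fuel - 1, by omega⟩
    have hlen' : (path.length : Int) = n := by omega
    rw [pvDfsA]
    simp only [hlen', if_true, pvExpK]
    exact pv_foldl_skip _ _ _ (fun acc v hv => by
      simp [pv_full_path n path hnd hsub hlen' v hv])
  | succ k ih =>
    intro fuel path acc hfuel hnd hsub hlen
    obtain ⟨f, rfl⟩ : ∃ f, fuel = f + 1 := ⟨fuel - 1, by omega⟩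
    have hne : ¬ ((path.length : Int) = n) := by omega
    rw [pvDfsA]
    simp only [hne, if_false]
    have hbody : ∀ (acc : List (List Int)) v, v ∈ PySem.List.pyRange 0 n 1 →
        (fun acc v =>
          if v ∈ path then acc
          else
            if min |v - pvLast path| (n - |v - pvLast path|) ≤ d ∧
               PySem.Int.mod (min |v - pvLast path| (n - |v - pvLast path|)) 2 = 0 then
              pvDfsA n d f (path ++ [v]) acc
            else acc) acc v =
        acc ++ (fun v => if v ∉ path ∧ min |v - pvLast path| (n - |v - pvLast path|) ≤ d ∧
            PySem.Int.mod (min |v - pvLast path| (n - |v - pvLast path|)) 2 = 0 then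
          pvExpK n d k [path ++ [v]] else []) v := by
      intro acc v hv
      dsimp only
      by_cases hmem : v ∈ path
      · rw [if_pos hmem, if_neg (fun h => h.1 hmem)]
        simp
      · by_cases hc : min |v - pvLast path| (n - |v - pvLast path|) ≤ d ∧
            PySem.Int.mod (min |v - pvLast path| (n - |v - pvLast path|)) 2 = 0
        · rw [if_neg hmem, if_pos hc, if_pos ⟨hmem, hc⟩]
          exact ih f (path ++ [v]) acc (by omega)
            (by rw [List.nodup_append]
                refine ⟨hnd, List.nodup_singleton v, ?_⟩
                intro a ha b hb
                rw [List.mem_singleton] at hb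
                exact fun h => hmem ((hb ▸ h : a = v) ▸ ha))
            (by intro x hx
                rcases List.mem_append.mp hx with h | h
                · exact hsub x h
                · rw [List.mem_singleton.mp h]; exact hv)
            (by simp only [List.length_append, List.length_singleton]; push_cast; omega)
        · rw [if_neg hmem, if_neg hc, if_neg (fun h => hc h.2)]
          simp
    rw [pv_foldl_append_of _ _ _ acc hbody]
    rw [pvExpK]
    have hexp : pvExpand n d [path] =
        (PySem.List.pyRange 0 n 1).flatMap (fun v =>
          if v ∉ path ∧ min |v - pvLast path| (n - |v - pvLast path|) ≤ d ∧
             PySem.Int.mod (min |v - pvLast path| (n - |v - pvLast path|)) 2 = 0 then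
            [path ++ [v]] else []) := by
      simp [pvExpand]
    rw [hexp, pvExpK_flatMap]
    have hfun : ∀ v : Int,
        (if v ∉ path ∧ min |v - pvLast path| (n - |v - pvLast path|) ≤ d ∧
            PySem.Int.mod (min |v - pvLast path| (n - |v - pvLast path|)) 2 = 0 then
          pvExpK n d k [path ++ [v]] else []) =
        pvExpK n d k (if v ∉ path ∧ min |v - pvLast path| (n - |v - pvLast path|) ≤ d ∧
            PySem.Int.mod (min |v - pvLast path| (n - |v - pvLast path|)) 2 = 0 then
          [path ++ [v]] else []) := by
      intro v
      by_cases hc : v ∉ path ∧ min |v - pvLast path| (n - |v - pvLast path|) ≤ d ∧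
          PySem.Int.mod (min |v - pvLast path| (n - |v - pvLast path|)) 2 = 0
      · rw [if_pos hc, if_pos hc]
      · rw [if_neg hc, if_neg hc, pvExpK_nil]
    simp only [hfun]

-- ===== VERDICT (by name: the statement is the Claim_ definition above) =====
theorem hamilton_mci_alg_4_spec : Claim_equal_hamilton_mci_alg_4 := by
  intro n d _
  unfold Spec_hamilton_mci_alg_4 hamilton_mci_alg_4 hamilton_mci_alg_4_alt
  by_cases hn : n < 1
  · have h0 : n.toNat = 0 := by omega
    rw [h0, pvDfsA]
    have hne : ¬ (((([0] : List Int).length : Int)) = n) := by simp; omega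
    simp only [hne, if_false, hn, if_true]
    rw [PySem.List.pyRange_one_eq_nil (by omega)]
    rfl
  · have hn' : (1 : Int) ≤ n := by omega
    rw [pv_dfs_eq_expK n d (n - 1).toNat (n.toNat + 1) [0] [] (by omega)
      (by simp)
      (by intro x hx
          simp at hx
          subst hx
          rw [PySem.List.mem_pyRange_one]
          omega)
      (by simp only [List.length_singleton]; push_cast; omega)]
    rw [if_neg hn]
    rw [pv_foldl_const, PySem.List.length_pyRange_one]
    simp
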